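-- pv_equiv track=rewrite | github.com/tsbloxsom/303-Python | project3.5.py | message_to_num
-- ===== SOURCE A (Python) =====
-- alpha = {'a':1,'b':2,'c':3,'d':4,'e':5,'f':6,'g':7,'h':8,
--     'i':9,'j':10,'k':11,'l':12,'m':13,'n':14,'o':15,'p':16,'q':17,
--     'r':18,'s':19,'t':20,'u':21,'v':22,'w':23,'x':24,'y':25,'z':26
--     }
--
-- def message_to_num(message, shift):
--     num_message = []
--     message = message.lower()
--     for i in message:
--         for x, y in alpha.items():
--             if x == i:
--                 y = y + shift
--                 if y > 26:
--                     y = y - 26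
--                 num_message.append(y)
--     return num_message
-- ===== SOURCE B (Python) =====
-- def _shifted(c, shift):
--     y = ord(c) - 96 + shift
--     return y - 26 if y > 26 else y
--
-- def message_to_num(message, shift):
--     return [_shifted(c, shift) for c in message.lower() if 'a' <= c <= 'z']
-- ===== Notes on version B (the rewrite author's own statement) =====
-- stated objective: simpler
-- what changed: Replaces the 26-entry dict and the inner scan over its items by a range test plus ord() arithmetic, and the accumulator loop by a single filtered comprehension.
import Mathlib
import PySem

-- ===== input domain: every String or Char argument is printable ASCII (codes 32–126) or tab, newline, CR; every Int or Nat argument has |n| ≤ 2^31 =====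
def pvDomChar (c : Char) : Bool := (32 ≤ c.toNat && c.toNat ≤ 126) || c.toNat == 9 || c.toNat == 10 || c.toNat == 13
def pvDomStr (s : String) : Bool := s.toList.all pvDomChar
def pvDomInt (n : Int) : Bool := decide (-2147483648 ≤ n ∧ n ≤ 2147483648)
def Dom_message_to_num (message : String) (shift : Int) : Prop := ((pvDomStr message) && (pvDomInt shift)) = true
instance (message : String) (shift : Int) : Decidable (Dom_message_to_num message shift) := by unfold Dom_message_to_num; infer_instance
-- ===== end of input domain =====

-- B replaces A's inner scan over a 26-entry dict by a range test and ord-arithmetic in one filtered map (simpler, same results).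


-- ===== PORT A =====
-- alpha.items() of the module-level dict, in insertion order
def alphaItems : List (Char × Int) :=
  [('a',1),('b',2),('c',3),('d',4),('e',5),('f',6),('g',7),('h',8),
   ('i',9),('j',10),('k',11),('l',12),('m',13),('n',14),('o',15),('p',16),('q',17),
   ('r',18),('s',19),('t',20),('u',21),('v',22),('w',23),('x',24),('y',25),('z',26)]

def message_to_num (message : String) (shift : Int) : List Int :=
  let message := PySem.Str.lower message
  message.toList.foldl (fun num_message i =>
    alphaItems.foldl (fun num_message xy =>
      if xy.1 == i then
        let y := xy.2 + shift
        let y := if y > 26 then y - 26 else y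
        num_message ++ [y]
      else num_message) num_message) []

-- ===== PORT B =====
def shiftedVal (c : Char) (shift : Int) : Int :=
  let y : Int := (c.toNat : Int) - 96 + shift
  if y > 26 then y - 26 else y

def message_to_num_alt (message : String) (shift : Int) : List Int :=
  (((PySem.Str.lower message).toList.filter (fun c => 'a' ≤ c && c ≤ 'z')).map
    (fun c => shiftedVal c shift))

-- ===== PRECONDITION & SPEC =====
def Spec_message_to_num (message : String) (shift : Int) (out : List Int) : Prop := out = message_to_num_alt message shift
instance (message : String) (shift : Int) (out : List Int) : Decidable (Spec_message_to_num message shift out) := by unfold Spec_message_to_num; infer_instance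

-- ===== CLAIM (what is proved, stated in full; the proofs are below) =====
def Claim_equal_message_to_num : Prop := ∀ (message : String) (shift : Int), Dom_message_to_num message shift → Spec_message_to_num message shift (message_to_num message shift)

-- ===== LEMMAS AND PROOFS =====

-- A foldl that never matches its test leaves the accumulator unchanged.
theorem foldl_no_match (c : Char) (shift : Int) :
    ∀ (l : List (Char × Int)) (acc : List Int), (∀ xy ∈ l, (xy.1 == c) = false) →
      l.foldl (fun num_message xy =>
        if xy.1 == c then
          let y := xy.2 + shift
          let y := if y > 26 then y - 26 else y
          num_message ++ [y]
        else num_message) acc = acc := by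
  intro l
  induction l with
  | nil => intro acc _; rfl
  | cons x xs ih =>
      intro acc hne
      have hx := hne x List.mem_cons_self
      simp only [List.foldl_cons, hx, Bool.false_eq_true, if_false]
      exact ih acc (fun xy hxy => hne xy (List.mem_cons_of_mem _ hxy))

-- A's inner scan over alphaItems appends exactly B's per-character value (or nothing).
theorem inner_scan_eq (c : Char) (shift : Int) (acc : List Int) :
    alphaItems.foldl (fun num_message xy =>
      if xy.1 == c then
        let y := xy.2 + shift
        let y := if y > 26 then y - 26 else y
        num_message ++ [y]
      else num_message) acc
    = acc ++ (if ('a' ≤ c && c ≤ 'z') then [shiftedVal c shift] else []) := by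
  by_cases h : ('a' ≤ c && c ≤ 'z') = true
  · have h1 : 97 ≤ c.toNat := by
      have := (Bool.and_eq_true ..).mp h |>.1
      simpa [Char.le_def] using of_decide_eq_true this
    have h2 : c.toNat ≤ 122 := by
      have := (Bool.and_eq_true ..).mp h |>.2
      simpa [Char.le_def] using of_decide_eq_true this
    have hc : Char.ofNat c.toNat = c := Char.ofNat_toNat c
    rw [h]
    interval_cases hn : c.toNat <;>
      (subst hc; simp [alphaItems, shiftedVal])
  · rw [if_neg h, List.append_nil]
    apply foldl_no_match
    intro xy hxy
    by_contra hb
    have heq : xy.1 = c := eq_of_beq (by simpa using hb)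
    subst heq
    fin_cases hxy <;> simp_all

theorem flatMap_if_singleton (l : List Char) (p : Char → Bool) (f : Char → Int) :
    l.flatMap (fun c => if p c then [f c] else []) = (l.filter p).map f := by
  induction l with
  | nil => rfl
  | cons x xs ih =>
      simp only [List.flatMap_cons, List.filter_cons, ih]
      by_cases h : p x = true <;> simp [h]

-- ===== VERDICT (by name: the statement is the Claim_ definition above) =====
theorem message_to_num_spec : Claim_equal_message_to_num := by
  intro message shift _
  unfold Spec_message_to_num message_to_num message_to_num_alt
  simp only [inner_scan_eq]
  rw [PySem.List.foldl_append_eq_flatMap, flatMap_if_singleton]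
  simp
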